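-- pv_equiv track=rewrite | github.com/llxSKyWALKeRxll/Stress_Testing_1 | leastFreqElement.py | findLeastFreqElementMapping
-- ===== SOURCE A (Python) =====
-- def findLeastFreqElementMapping(arr):
--     dictMap = {}
--     for i in range(len(arr)):
--         if (arr[i] in dictMap.keys()):
--             dictMap[arr[i]] += 1
--         else:
--             dictMap[arr[i]] = 1
--     leastElementCtr = min(dictMap.values())
--     for i in dictMap:
--         if dictMap[i] == leastElementCtr:
--             leastElement = i
--             break
--     return leastElement, leastElementCtr
-- ===== SOURCE B (Python) =====
-- def findLeastFreqElementMapping(arr):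
--     s = sorted(arr)
--     best = None
--     candidates = set()
--     i = 0
--     while i < len(s):
--         j = i
--         while j < len(s) and s[j] == s[i]:
--             j += 1
--         if best is None or j - i < best:
--             best = j - i
--             candidates = {s[i]}
--         elif j - i == best:
--             candidates.add(s[i])
--         i = j
--     leastElement = next(x for x in arr if x in candidates)
--     return leastElement, best
-- ===== Notes on version B (the rewrite author's own statement) =====
-- stated objective: alternative
-- what changed: B replaces A's frequency dictionary by sorting: it sorts the list, scans runs of equal values to find the minimal run length and the set of values attaining it, then returns the first element of arr in that set; same first-occurrence tie-break without any counting map.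
import Mathlib
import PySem

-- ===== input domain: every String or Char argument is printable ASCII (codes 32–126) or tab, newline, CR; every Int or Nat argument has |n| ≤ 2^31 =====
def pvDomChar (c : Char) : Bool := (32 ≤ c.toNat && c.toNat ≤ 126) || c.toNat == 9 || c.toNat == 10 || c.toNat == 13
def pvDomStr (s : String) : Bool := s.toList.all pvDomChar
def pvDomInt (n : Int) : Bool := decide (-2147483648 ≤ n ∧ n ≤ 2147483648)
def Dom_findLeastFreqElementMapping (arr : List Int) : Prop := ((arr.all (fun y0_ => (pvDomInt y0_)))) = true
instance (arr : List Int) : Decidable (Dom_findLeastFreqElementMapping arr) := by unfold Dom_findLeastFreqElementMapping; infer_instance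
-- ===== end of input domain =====

-- B drops the frequency dict: it sorts arr, scans runs of equal values for the minimal
-- run length and the set of values attaining it, and returns the first element of arr in
-- that set (alternative sort-based algorithm, same first-occurrence tie-break).

-- ===== PORT A =====
-- loop body of A's counting loop (if x in dictMap.keys(): dictMap[x] += 1 else: dictMap[x] = 1)
def pvCountStep (d : PySem.Dict Int Int) (x : Int) : PySem.Dict Int Int :=
  if d.contains x then d.modify x 0 (· + 1) else d.insert x 1

-- for i in range(len(arr)): indices are always in range, so arr[i] is pyGetD arr i 0 (exact here)
def findLeastFreqElementMapping (arr : List Int) : Int × Int :=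
  let dictMap : PySem.Dict Int Int :=
    (PySem.List.pyRange 0 (PySem.List.len arr)).foldl
      (fun d i => pvCountStep d (PySem.List.pyGetD arr i 0)) PySem.Dict.empty
  match PySem.List.min? dictMap.values (fun v => v) with
  | none => (0, 0)        -- unreachable under Pre_: min([]) raises ValueError in Python
  | some leastElementCtr =>
    match dictMap.keys.find? (fun i => dictMap.getD i 0 == leastElementCtr) with
    | some leastElement => (leastElement, leastElementCtr)
    | none => (0, leastElementCtr)   -- unreachable: the minimum is always attained

-- ===== PORT B =====
-- inner while: j advances while s[j] == s[i]; returns the run length past the head and the rest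
def pvRun (v : Int) : List Int → Nat × List Int
  | [] => (0, [])
  | x :: xs => if x == v then ((pvRun v xs).1 + 1, (pvRun v xs).2) else (0, x :: xs)

-- termination of the outer while: the suffix only shrinks
theorem pvRun_snd_length_le (v : Int) : ∀ xs : List Int, (pvRun v xs).2.length ≤ xs.length := by
  intro xs
  induction xs with
  | nil => simp [pvRun]
  | cons x t ih =>
    simp only [pvRun]
    split
    · exact Nat.le_succ_of_le ih
    · simp

-- outer while over the remaining sorted suffix, state (best, candidates)
def pvScan (s : List Int) (best : Option Nat) (cands : PySem.Set Int) : Option Nat × PySem.Set Int :=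
  match s with
  | [] => (best, cands)
  | v :: xs =>
    match best with
    | none => pvScan (pvRun v xs).2 (some ((pvRun v xs).1 + 1)) (PySem.Set.ofList [v])
    | some b =>
      if (pvRun v xs).1 + 1 < b then
        pvScan (pvRun v xs).2 (some ((pvRun v xs).1 + 1)) (PySem.Set.ofList [v])
      else if (pvRun v xs).1 + 1 == b then
        pvScan (pvRun v xs).2 (some b) (PySem.Set.add cands v)
      else
        pvScan (pvRun v xs).2 (some b) cands
termination_by s.length
decreasing_by all_goals (simp only [List.length_cons]; exact Nat.lt_succ_of_le (pvRun_snd_length_le v xs))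

def findLeastFreqElementMapping_alt (arr : List Int) : Int × Int :=
  let s := PySem.List.sorted arr (fun x => x) false
  match pvScan s none PySem.Set.empty with
  | (some best, candidates) =>
    (match arr.find? (fun x => PySem.Set.contains candidates x) with
     | some leastElement => (leastElement, (best : Int))
     | none => (0, (best : Int)))       -- unreachable: next() always finds a candidate
  | (none, _) => (0, 0)                 -- unreachable under Pre_: next() raises StopIteration on []

-- ===== PRECONDITION & SPEC =====
-- Pre_ excludes only the empty list, on which both A's min(values) and B's min(firsts) raise ValueError.
def Pre_findLeastFreqElementMapping (arr : List Int) : Prop := arr ≠ []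
instance (arr : List Int) : Decidable (Pre_findLeastFreqElementMapping arr) := by
  unfold Pre_findLeastFreqElementMapping; infer_instance
def pvWitness_findLeastFreqElementMapping : List Int := [1, 1, 2]

def Spec_findLeastFreqElementMapping (arr : List Int) (out : Int × Int) : Prop :=
  out = findLeastFreqElementMapping_alt arr
instance (arr : List Int) (out : Int × Int) : Decidable (Spec_findLeastFreqElementMapping arr out) := by
  unfold Spec_findLeastFreqElementMapping; infer_instance

-- ===== CLAIM (what is proved, stated in full; the proofs are below) =====
def Claim_equal_findLeastFreqElementMapping : Prop :=
  ∀ (arr : List Int), Dom_findLeastFreqElementMapping arr →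
    Pre_findLeastFreqElementMapping arr →
    Spec_findLeastFreqElementMapping arr (findLeastFreqElementMapping arr)

-- ===== LEMMAS AND PROOFS =====

-- the step of PySem.List.min?
def pvMinStep (f : Int → Int) (acc : Option Int) (x : Int) : Option Int :=
  match acc with
  | none => some x
  | some m => if f x < f m then some x else some m

theorem pv_min?_eq_foldl (xs : List Int) (f : Int → Int) :
    PySem.List.min? xs f = xs.foldl (pvMinStep f) none := by
  unfold PySem.List.min?
  congr 1
  funext acc x
  cases acc <;> rfl

-- the fold never drops back to none
theorem pv_foldl_some (f : Int → Int) :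
    ∀ (t : List Int) (m : Int), ∃ m', t.foldl (pvMinStep f) (some m) = some m' := by
  intro t
  induction t with
  | nil => intro m; exact ⟨m, rfl⟩
  | cons x t ih =>
    intro m
    simp only [List.foldl, pvMinStep]
    by_cases hx : f x < f m
    · rw [if_pos hx]; exact ih x
    · rw [if_neg hx]; exact ih m

-- running minimum never increases
theorem pv_foldl_min_le (f : Int → Int) :
    ∀ (t : List Int) (m m' : Int),
      t.foldl (pvMinStep f) (some m) = some m' → f m' ≤ f m := by
  intro t
  induction t with
  | nil =>
    intro m m' h
    simp only [List.foldl, Option.some.injEq] at h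
    rw [h]
  | cons x t ih =>
    intro m m' h
    simp only [List.foldl, pvMinStep] at h
    by_cases hx : f x < f m
    · rw [if_pos hx] at h
      have := ih x m' h; omega
    · rw [if_neg hx] at h
      exact ih m m' h

-- the first element reaching the minimal key IS the first extremal element of the min? fold
theorem pv_find_first_min (f : Int → Int) :
    ∀ (t : List Int) (m m' : Int),
      t.foldl (pvMinStep f) (some m) = some m' →
      (m :: t).find? (fun x => f x == f m') = some m' := by
  intro t
  induction t with
  | nil =>
    intro m m' h
    simp only [List.foldl, Option.some.injEq] at h
    subst h
    simp [List.find?]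
  | cons x t ih =>
    intro m m' h
    simp only [List.foldl, pvMinStep] at h
    by_cases hx : f x < f m
    · rw [if_pos hx] at h
      have hle : f m' ≤ f x := pv_foldl_min_le f t x m' h
      have hne : (f m == f m') = false := by
        rw [beq_eq_false_iff_ne]; omega
      have hrec := ih x m' h
      simp only [List.find?] at hrec ⊢
      rw [hne]
      exact hrec
    · rw [if_neg hx] at h
      have hle : f m' ≤ f m := pv_foldl_min_le f t m m' h
      have hrec := ih m m' h
      simp only [List.find?] at hrec ⊢
      by_cases hm : (f m == f m') = true
      · rw [hm] at hrec ⊢; exact hrec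
      · rw [Bool.not_eq_true] at hm
        rw [hm] at hrec
        have hmne : f m ≠ f m' := beq_eq_false_iff_ne.mp hm
        have hxne : (f x == f m') = false := by
          rw [beq_eq_false_iff_ne]
          have hmlt : f m' < f m := lt_of_le_of_ne hle (fun hc => hmne hc.symm)
          have : f m ≤ f x := le_of_not_gt hx
          omega
        rw [hm, hxne]
        exact hrec

-- min? over mapped values equals f of min? with key f (fold form)
theorem pv_min_map_fold (f : Int → Int) :
    ∀ (ks : List Int) (acc : Option Int),
      (ks.map f).foldl (pvMinStep (fun v => v)) (acc.map f) =
        (ks.foldl (pvMinStep f) acc).map f := by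
  intro ks
  induction ks with
  | nil => intro acc; simp [List.foldl]
  | cons k ks ih =>
    intro acc
    simp only [List.map, List.foldl]
    cases acc with
    | none => exact ih (some k)
    | some m =>
      simp only [Option.map, pvMinStep]
      by_cases h : f k < f m
      · rw [if_pos h, if_pos h]
        have := ih (some k)
        simpa [Option.map] using this
      · rw [if_neg h, if_neg h]
        have := ih (some m)
        simpa [Option.map] using this

theorem pv_min?_map (f : Int → Int) (ks : List Int) :
    PySem.List.min? (ks.map f) (fun v => v) = (PySem.List.min? ks f).map f := by
  rw [pv_min?_eq_foldl, pv_min?_eq_foldl]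
  have := pv_min_map_fold f ks none
  simpa [Option.map] using this

-- A's counting loop builds exactly Counter(arr)
theorem pv_dict_eq_counter (arr : List Int) :
    (PySem.List.pyRange 0 (PySem.List.len arr)).foldl
      (fun d i => pvCountStep d (PySem.List.pyGetD arr i 0)) PySem.Dict.empty
    = PySem.Dict.counter arr := by
  rw [PySem.List.foldl_pyRange_pyGetD arr 0 pvCountStep PySem.Dict.empty (le_refl 0)]
  simp only [Int.toNat_zero, List.drop_zero]
  have hstep : pvCountStep = fun d x => d.insert x (d.getD x 0 + 1) := by
    funext d x
    unfold pvCountStep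
    by_cases h : d.contains x = true
    · rw [if_pos h]; rfl
    · rw [if_neg h]
      rw [PySem.Dict.getD_of_not_contains d 0 (by simpa using h)]
      norm_num
  rw [hstep, PySem.Dict.foldl_insert_getD_add_one_eq_counter]

-- ----- B-side lemmas: run structure of a sorted list -----
theorem pvRun_spec (v : Int) : ∀ xs : List Int, xs.Pairwise (· ≤ ·) → (∀ y ∈ xs, v ≤ y) →
    (pvRun v xs).1 = List.count v xs ∧
    (pvRun v xs).2.Pairwise (· ≤ ·) ∧
    (∀ y ∈ (pvRun v xs).2, v < y) ∧
    (∀ y ∈ (pvRun v xs).2, y ∈ xs) ∧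
    (∀ y : Int, y ≠ v → List.count y (pvRun v xs).2 = List.count y xs) := by
  intro xs
  induction xs with
  | nil => intro _ _; simp [pvRun]
  | cons x t ih =>
    intro hp hb
    rw [List.pairwise_cons] at hp
    have hxt : ∀ y ∈ t, x ≤ y := hp.1
    have hvx : v ≤ x := hb x (by simp)
    simp only [pvRun]
    by_cases hx : (x == v) = true
    · rw [if_pos hx]
      have hxv : x = v := by simpa using hx
      subst hxv
      have hbt : ∀ y ∈ t, x ≤ y := hxt
      obtain ⟨h1, h2, h3, h4, h5⟩ := ih hp.2 hbt
      refine ⟨?_, h2, h3, fun y hy => by simp [h4 y hy], fun y hy => ?_⟩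
      · simp [h1, List.count_cons_self]
      · rw [h5 y hy]
        simp [Ne.symm hy]
    · rw [if_neg hx]
      have hxv : x ≠ v := by simpa using hx
      have hvltx : v < x := lt_of_le_of_ne hvx (fun h => hxv h.symm)
      refine ⟨?_, ?_, ?_, ?_, ?_⟩
      · symm
        rw [List.count_eq_zero]
        intro hmem
        rcases List.mem_cons.mp hmem with h | h
        · exact hxv h.symm
        · exact absurd (hxt v h) (not_le.mpr hvltx)
      · exact List.pairwise_cons.mpr ⟨hxt, hp.2⟩
      · intro y hy
        rcases List.mem_cons.mp hy with h | h
        · rw [h]; exact hvltx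
        · exact lt_of_lt_of_le hvltx (hxt y h)
      · intro y hy; exact hy
      · intro y _; rfl

theorem pvScan_go : ∀ (n : Nat) (s : List Int), s.length ≤ n → ∀ (b : Nat) (c : PySem.Set Int),
    s.Pairwise (· ≤ ·) →
    ∃ b' c', pvScan s (some b) c = (some b', c') ∧
      b' ≤ b ∧
      (∀ v ∈ s, b' ≤ List.count v s) ∧
      (b' = b ∨ ∃ v ∈ s, List.count v s = b') ∧
      (∀ x : Int, x ∈ (c' : List Int) ↔ ((b' = b ∧ x ∈ (c : List Int)) ∨ (x ∈ s ∧ List.count x s = b'))) := by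
  intro n
  induction n with
  | zero =>
    intro s hlen b c _
    have hs : s = [] := List.eq_nil_of_length_eq_zero (Nat.le_zero.mp hlen)
    subst hs
    exact ⟨b, c, by rw [pvScan], le_refl b, by simp, Or.inl rfl, by intro x; simp⟩
  | succ n ih =>
    intro s hlen b c hp
    cases s with
    | nil => exact ⟨b, c, by rw [pvScan], le_refl b, by simp, Or.inl rfl, by intro x; simp⟩
    | cons v xs =>
      rw [List.pairwise_cons] at hp
      obtain ⟨h1, h2, h3, h4, h5⟩ := pvRun_spec v xs hp.2 hp.1
      have hrest_len : (pvRun v xs).2.length ≤ n := by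
        have := pvRun_snd_length_le v xs
        simp only [List.length_cons] at hlen
        omega
      have hcv : List.count v (v :: xs) = (pvRun v xs).1 + 1 := by
        simp [List.count_cons_self, h1]
      have hcy : ∀ y : Int, y ≠ v → List.count y (v :: xs) = List.count y (pvRun v xs).2 := by
        intro y hy
        rw [h5 y hy]
        simp [Ne.symm hy]
      have hne_rest : ∀ y ∈ (pvRun v xs).2, y ≠ v := fun y hy => (h3 y hy).ne'
      have hmem_rest : ∀ y : Int, y ∈ (v :: xs) → y ≠ v → List.count y (v :: xs) ≠ 0 →
          y ∈ (pvRun v xs).2 := by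
        intro y hyS hyv hcnt
        rw [hcy y hyv] at hcnt
        exact List.count_pos_iff.mp (Nat.pos_of_ne_zero hcnt)
      have hcount_ne_zero : ∀ y : Int, y ∈ (v :: xs) → List.count y (v :: xs) ≠ 0 := by
        intro y hy
        exact Nat.pos_iff_ne_zero.mp (List.count_pos_iff.mpr hy)
      rw [pvScan]
      by_cases hlt : (pvRun v xs).1 + 1 < b
      · rw [if_pos hlt]
        obtain ⟨b', c', heq, hle, hbound, hatt, hmem⟩ :=
          ih (pvRun v xs).2 hrest_len ((pvRun v xs).1 + 1) (PySem.Set.ofList [v]) h2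
        refine ⟨b', c', heq, by omega, ?_, ?_, ?_⟩
        · intro u hu
          by_cases huv : u = v
          · subst huv; rw [hcv]; omega
          · rw [hcy u huv]
            exact hbound u (hmem_rest u hu huv (hcount_ne_zero u hu))
        · rcases hatt with hb' | ⟨u, hu, hcu⟩
          · exact Or.inr ⟨v, by simp, by rw [hcv, hb']⟩
          · exact Or.inr ⟨u, List.mem_cons_of_mem v (h4 u hu),
              by rw [hcy u (hne_rest u hu)]; exact hcu⟩
        · intro x
          rw [hmem x]
          constructor
          · rintro (⟨hb', hx⟩ | ⟨hx, hcx⟩)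
            · have hxv : x = v := by
                have := (PySem.Set.mem_ofList [v] x).mp hx
                simpa using this
              subst hxv
              exact Or.inr ⟨by simp, by rw [hcv, hb']⟩
            · exact Or.inr ⟨List.mem_cons_of_mem v (h4 x hx),
                by rw [hcy x (hne_rest x hx)]; exact hcx⟩
          · rintro (⟨hb', _⟩ | ⟨hx, hcx⟩)
            · omega
            · by_cases hxv : x = v
              · subst hxv
                rw [hcv] at hcx
                exact Or.inl ⟨hcx.symm, (PySem.Set.mem_ofList [x] x).mpr (by simp)⟩
              · refine Or.inr ⟨hmem_rest x hx hxv (hcount_ne_zero x hx), ?_⟩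
                rw [← hcy x hxv]
                exact hcx
      · rw [if_neg hlt]
        by_cases heqb : ((pvRun v xs).1 + 1 == b) = true
        · rw [if_pos heqb]
          have hb : (pvRun v xs).1 + 1 = b := by simpa using heqb
          obtain ⟨b', c', heq, hle, hbound, hatt, hmem⟩ :=
            ih (pvRun v xs).2 hrest_len b (PySem.Set.add c v) h2
          refine ⟨b', c', heq, hle, ?_, ?_, ?_⟩
          · intro u hu
            by_cases huv : u = v
            · subst huv; rw [hcv]; omega
            · rw [hcy u huv]
              exact hbound u (hmem_rest u hu huv (hcount_ne_zero u hu))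
          · rcases hatt with hb' | ⟨u, hu, hcu⟩
            · exact Or.inl hb'
            · exact Or.inr ⟨u, List.mem_cons_of_mem v (h4 u hu),
                by rw [hcy u (hne_rest u hu)]; exact hcu⟩
          · intro x
            rw [hmem x]
            constructor
            · rintro (⟨hb', hx⟩ | ⟨hx, hcx⟩)
              · rcases (PySem.Set.mem_add c v x).mp hx with hxc | hxv
                · exact Or.inl ⟨hb', hxc⟩
                · subst hxv
                  exact Or.inr ⟨by simp, by rw [hcv]; omega⟩
              · exact Or.inr ⟨List.mem_cons_of_mem v (h4 x hx),
                  by rw [hcy x (hne_rest x hx)]; exact hcx⟩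
            · rintro (⟨hb', hxc⟩ | ⟨hx, hcx⟩)
              · exact Or.inl ⟨hb', (PySem.Set.mem_add c v x).mpr (Or.inl hxc)⟩
              · by_cases hxv : x = v
                · subst hxv
                  rw [hcv] at hcx
                  exact Or.inl ⟨by omega, (PySem.Set.mem_add c x x).mpr (Or.inr rfl)⟩
                · refine Or.inr ⟨hmem_rest x hx hxv (hcount_ne_zero x hx), ?_⟩
                  rw [← hcy x hxv]
                  exact hcx
        · rw [if_neg heqb]
          have hgt : b < (pvRun v xs).1 + 1 := by
            have : (pvRun v xs).1 + 1 ≠ b := by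
              intro h; exact heqb (by simp [h])
            omega
          obtain ⟨b', c', heq, hle, hbound, hatt, hmem⟩ :=
            ih (pvRun v xs).2 hrest_len b c h2
          refine ⟨b', c', heq, hle, ?_, ?_, ?_⟩
          · intro u hu
            by_cases huv : u = v
            · subst huv; rw [hcv]; omega
            · rw [hcy u huv]
              exact hbound u (hmem_rest u hu huv (hcount_ne_zero u hu))
          · rcases hatt with hb' | ⟨u, hu, hcu⟩
            · exact Or.inl hb'
            · exact Or.inr ⟨u, List.mem_cons_of_mem v (h4 u hu),
                by rw [hcy u (hne_rest u hu)]; exact hcu⟩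
          · intro x
            rw [hmem x]
            constructor
            · rintro (⟨hb', hxc⟩ | ⟨hx, hcx⟩)
              · exact Or.inl ⟨hb', hxc⟩
              · exact Or.inr ⟨List.mem_cons_of_mem v (h4 x hx),
                  by rw [hcy x (hne_rest x hx)]; exact hcx⟩
            · rintro (⟨hb', hxc⟩ | ⟨hx, hcx⟩)
              · exact Or.inl ⟨hb', hxc⟩
              · by_cases hxv : x = v
                · subst hxv
                  rw [hcv] at hcx
                  omega
                · refine Or.inr ⟨hmem_rest x hx hxv (hcount_ne_zero x hx), ?_⟩
                  rw [← hcy x hxv]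
                  exact hcx

theorem pvScan_top (s : List Int) (hs : s.Pairwise (· ≤ ·)) (hne : s ≠ []) :
    ∃ b' c', pvScan s none PySem.Set.empty = (some b', c') ∧
      (∀ v ∈ s, b' ≤ List.count v s) ∧
      (∃ v ∈ s, List.count v s = b') ∧
      (∀ x : Int, x ∈ (c' : List Int) ↔ (x ∈ s ∧ List.count x s = b')) := by
  cases s with
  | nil => exact absurd rfl hne
  | cons v xs =>
    rw [List.pairwise_cons] at hs
    obtain ⟨h1, h2, h3, h4, h5⟩ := pvRun_spec v xs hs.2 hs.1
    have hcv : List.count v (v :: xs) = (pvRun v xs).1 + 1 := by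
      simp [List.count_cons_self, h1]
    have hcy : ∀ y : Int, y ≠ v → List.count y (v :: xs) = List.count y (pvRun v xs).2 := by
      intro y hy
      rw [h5 y hy]
      simp [Ne.symm hy]
    have hne_rest : ∀ y ∈ (pvRun v xs).2, y ≠ v := fun y hy => (h3 y hy).ne'
    have hmem_rest : ∀ y : Int, y ≠ v → List.count y (v :: xs) ≠ 0 → y ∈ (pvRun v xs).2 := by
      intro y hyv hcnt
      rw [hcy y hyv] at hcnt
      exact List.count_pos_iff.mp (Nat.pos_of_ne_zero hcnt)
    have hcount_ne_zero : ∀ y : Int, y ∈ (v :: xs) → List.count y (v :: xs) ≠ 0 := by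
      intro y hy
      exact Nat.pos_iff_ne_zero.mp (List.count_pos_iff.mpr hy)
    rw [pvScan]
    obtain ⟨b', c', heq, hle, hbound, hatt, hmem⟩ :=
      pvScan_go (pvRun v xs).2.length (pvRun v xs).2 (le_refl _)
        ((pvRun v xs).1 + 1) (PySem.Set.ofList [v]) h2
    refine ⟨b', c', heq, ?_, ?_, ?_⟩
    · intro u hu
      by_cases huv : u = v
      · subst huv; rw [hcv]; omega
      · rw [hcy u huv]
        exact hbound u (hmem_rest u huv (hcount_ne_zero u hu))
    · rcases hatt with hb' | ⟨u, hu, hcu⟩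
      · exact ⟨v, by simp, by rw [hcv, hb']⟩
      · exact ⟨u, List.mem_cons_of_mem v (h4 u hu),
          by rw [hcy u (hne_rest u hu)]; exact hcu⟩
    · intro x
      rw [hmem x]
      constructor
      · rintro (⟨hb', hx⟩ | ⟨hx, hcx⟩)
        · have hxv : x = v := by
            have := (PySem.Set.mem_ofList [v] x).mp hx
            simpa using this
          subst hxv
          exact ⟨by simp, by rw [hcv, hb']⟩
        · exact ⟨List.mem_cons_of_mem v (h4 x hx),
            by rw [hcy x (hne_rest x hx)]; exact hcx⟩
      · rintro ⟨hx, hcx⟩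
        by_cases hxv : x = v
        · subst hxv
          rw [hcv] at hcx
          exact Or.inl ⟨hcx.symm, (PySem.Set.mem_ofList [x] x).mpr (by simp)⟩
        · refine Or.inr ⟨hmem_rest x hxv (hcount_ne_zero x hx), ?_⟩
          rw [← hcy x hxv]
          exact hcx

-- ----- find? transport lemmas -----
theorem pv_find?_congr (p q : Int → Bool) : ∀ l : List Int, (∀ x ∈ l, p x = q x) → l.find? p = l.find? q := by
  intro l
  induction l with
  | nil => intro _; rfl
  | cons x t ih =>
    intro h
    have hx : p x = q x := h x (by simp)
    simp only [List.find?]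
    rw [hx]
    cases q x
    · exact ih (fun y hy => h y (by simp [hy]))
    · rfl

theorem pv_add_eq (s : PySem.Set Int) (x : Int) :
    PySem.Set.add s x = if PySem.Set.contains s x = true then s else s ++ [x] := rfl

theorem pv_foldl_add_prefix : ∀ (t acc : List Int), ∃ ext, t.foldl PySem.Set.add acc = acc ++ ext := by
  intro t
  induction t with
  | nil => intro acc; exact ⟨[], by simp⟩
  | cons x t ih =>
    intro acc
    simp only [List.foldl]
    rw [pv_add_eq]
    by_cases h : PySem.Set.contains acc x = true
    · rw [if_pos h]; exact ih acc
    · rw [if_neg h]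
      obtain ⟨ext, hext⟩ := ih (acc ++ [x])
      exact ⟨x :: ext, by simpa using hext⟩

-- the first element of a list satisfying p is the first element of its set-of-firsts satisfying p
theorem pv_find?_foldl_add (p : Int → Bool) :
    ∀ (t acc : List Int), (∀ y ∈ acc, p y = false) → (t.foldl PySem.Set.add acc).find? p = t.find? p := by
  intro t
  induction t with
  | nil =>
    intro acc hacc
    simp only [List.foldl, List.find?_nil]
    exact List.find?_eq_none.mpr (fun y hy => by simp [hacc y hy])
  | cons x t ih =>
    intro acc hacc
    simp only [List.foldl, List.find?]
    rw [pv_add_eq]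
    by_cases hmem : PySem.Set.contains acc x = true
    · rw [if_pos hmem]
      have hx : p x = false := hacc x ((PySem.Set.contains_iff acc x).mp hmem)
      rw [hx]
      exact ih acc hacc
    · rw [if_neg hmem]
      by_cases hp : p x = true
      · rw [hp]
        obtain ⟨ext, hext⟩ := pv_foldl_add_prefix t (acc ++ [x])
        rw [hext, List.append_assoc, List.find?_append]
        have hnone : acc.find? p = none :=
          List.find?_eq_none.mpr (fun y hy => by simp [hacc y hy])
        rw [hnone]
        simp [hp]
      · rw [Bool.not_eq_true] at hp
        rw [hp]
        exact ih (acc ++ [x]) (fun y hy => by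
          rcases List.mem_append.mp hy with h | h
          · exact hacc y h
          · simp only [List.mem_singleton] at h; rw [h]; exact hp)

theorem pv_find?_ofList (p : Int → Bool) (l : List Int) :
    (PySem.Set.ofList l : List Int).find? p = l.find? p := by
  rw [PySem.Set.ofList_eq_foldl]
  exact pv_find?_foldl_add p l [] (by simp)

-- ===== VERDICT (by name: the statement is the Claim_ definition above) =====
theorem findLeastFreqElementMapping_spec : Claim_equal_findLeastFreqElementMapping := by
  intro arr _ hpre
  unfold Spec_findLeastFreqElementMapping
  unfold findLeastFreqElementMapping findLeastFreqElementMapping_alt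
  simp only [pv_dict_eq_counter]
  set d : PySem.Dict Int Int := PySem.Dict.counter arr with hd
  set s : List Int := PySem.List.sorted arr (fun x => x) false with hsdef
  -- A side: the minimum of the counter's values and the first key attaining it
  have hkeys : d.keys = PySem.Set.ofList arr := PySem.Dict.keys_counter arr
  have hnodup : d.keys.Nodup := PySem.Dict.nodup_keys_counter arr
  have hvals : d.values = d.keys.map (fun k => d.getD k 0) :=
    PySem.Dict.values_eq_map_keys d hnodup 0
  obtain ⟨k0, t, hk⟩ : ∃ k0 t, d.keys = k0 :: t := by
    have hkeys_ne : d.keys ≠ [] := by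
      rw [hkeys]
      cases arr with
      | nil => exact absurd rfl hpre
      | cons a r => simp [PySem.Set.ofList_cons]
    cases h : d.keys with
    | nil => exact absurd h hkeys_ne
    | cons a b => exact ⟨a, b, rfl⟩
  obtain ⟨m', hm'⟩ := pv_foldl_some (fun k => d.getD k 0) t k0
  have hB : PySem.List.min? d.keys (fun k => d.getD k 0) = some m' := by
    rw [pv_min?_eq_foldl, hk]
    simpa [List.foldl, pvMinStep] using hm'
  have hA : PySem.List.min? d.values (fun v => v) = some (d.getD m' 0) := by
    rw [hvals, pv_min?_map, hB]
    rfl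
  have hfind : d.keys.find? (fun i => d.getD i 0 == d.getD m' 0) = some m' := by
    rw [hk]
    exact pv_find_first_min (fun k => d.getD k 0) t k0 m' hm'
  have hm'_mem : m' ∈ d.keys := PySem.List.min?_mem hB
  have hctr_min : ∀ y ∈ d.keys, d.getD m' 0 ≤ d.getD y 0 := PySem.List.min?_isMin hB
  -- B side: the run scan over the sorted copy
  have hperm : s.Perm arr := PySem.List.sorted_perm arr (fun x => x) false
  have hpw : s.Pairwise (· ≤ ·) := by
    have := PySem.List.sorted_pairwise arr (fun x => x)
    simpa using this
  have hsne : s ≠ [] := by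
    intro h
    exact hpre ((PySem.List.sorted_eq_nil_iff arr (fun x => x) false).mp h)
  obtain ⟨b', c', hscan, hbound, hatt, hcmem⟩ := pvScan_top s hpw hsne
  have hcount : ∀ x : Int, List.count x s = List.count x arr := fun x => hperm.count_eq x
  have hgd : ∀ x : Int, d.getD x 0 = (List.count x arr : Int) := fun x =>
    PySem.Dict.getD_counter arr x
  have hmem_keys : ∀ x : Int, x ∈ d.keys ↔ x ∈ arr := by
    intro x; rw [hkeys]; exact PySem.Set.mem_ofList arr x
  have hmem_s : ∀ x : Int, x ∈ s ↔ x ∈ arr := fun x => hperm.mem_iff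
  -- the two minima agree
  have hb'_le : (b' : Int) ≤ d.getD m' 0 := by
    rw [hgd m']
    have := hbound m' ((hmem_s m').mpr ((hmem_keys m').mp hm'_mem))
    rw [hcount m'] at this
    exact_mod_cast this
  have hctr_le : d.getD m' 0 ≤ (b' : Int) := by
    obtain ⟨u, hu, hcu⟩ := hatt
    have hukeys : u ∈ d.keys := (hmem_keys u).mpr ((hmem_s u).mp hu)
    have hle := hctr_min u hukeys
    rw [hgd u, ← hcount u, hcu] at hle
    exact hle
  have hb'ctr : (b' : Int) = d.getD m' 0 := le_antisymm hb'_le hctr_le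
  -- the two first-match scans agree
  have hfind_arr : arr.find? (fun x => PySem.Set.contains c' x) = some m' := by
    have hstep1 : arr.find? (fun x => PySem.Set.contains c' x)
        = arr.find? (fun x => d.getD x 0 == d.getD m' 0) := by
      apply pv_find?_congr
      intro x hxarr
      have h1 : PySem.Set.contains c' x = true ↔ List.count x s = b' := by
        rw [PySem.Set.contains_iff c' x, hcmem x]
        simp [(hmem_s x).mpr hxarr]
      have h2 : (d.getD x 0 == d.getD m' 0) = true ↔ List.count x s = b' := by
        rw [beq_iff_eq, hgd x, ← hb'ctr, hcount x]
        exact ⟨fun h => by exact_mod_cast h, fun h => by exact_mod_cast h⟩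
      rw [Bool.eq_iff_iff, h1, h2]
    rw [hstep1, ← pv_find?_ofList (fun x => d.getD x 0 == d.getD m' 0) arr, ← hkeys]
    exact hfind
  simp only [hA, hscan, hfind, hfind_arr, hb'ctr]
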